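-- pv_equiv track=rewrite | github.com/wangyuanchi/leetcode | 3973-flip-square-submatrix-vertically/flip-square-submatrix-vertically.py | reverseSubmatrix
-- ===== SOURCE A (Python) =====
-- from typing import List
--
-- def reverseSubmatrix(grid: List[List[int]], x: int, y: int, k: int) -> List[List[int]]:
--     l_row, r_row = x, x + k - 1
--
--     while l_row < r_row:
--         for i in range(y, y + k):
--             grid[l_row][i], grid[r_row][i] = grid[r_row][i], grid[l_row][i]
--         l_row += 1
--         r_row -= 1
--
--     return grid
-- ===== SOURCE B (Python) =====
-- from typing import List
--
-- def reverseSubmatrix(grid: List[List[int]], x: int, y: int, k: int) -> List[List[int]]: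
--     if k <= 1:
--         return grid
--     rows = [grid[r][y:y+k] for r in range(x, x + k)]
--     rows.reverse()
--     for i, r in enumerate(range(x, x + k)):
--         grid[r][y:y+k] = rows[i]
--     return grid
-- ===== Notes on version B (the rewrite author's own statement) =====
-- stated objective: simpler
-- what changed: Replaces the converging two-pointer in-place elementwise swap loop by a two-phase decomposition: snapshot the k row-segments as slices, reverse that list, and write each slice back in a second pass.
-- outside the precondition, e.g. on reverseSubmatrix([[1, 2], [3, 4]], 0, -2, 2): A returns [[3, 4], [1, 2]], B returns [[1, 2], [3, 4]]; on reverseSubmatrix([[1, 2], [3, 4]], -2, 0, 2): A returns [[3, 4], [1, 2]], B returns [[3, 4], [1, 2]]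
import Mathlib
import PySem

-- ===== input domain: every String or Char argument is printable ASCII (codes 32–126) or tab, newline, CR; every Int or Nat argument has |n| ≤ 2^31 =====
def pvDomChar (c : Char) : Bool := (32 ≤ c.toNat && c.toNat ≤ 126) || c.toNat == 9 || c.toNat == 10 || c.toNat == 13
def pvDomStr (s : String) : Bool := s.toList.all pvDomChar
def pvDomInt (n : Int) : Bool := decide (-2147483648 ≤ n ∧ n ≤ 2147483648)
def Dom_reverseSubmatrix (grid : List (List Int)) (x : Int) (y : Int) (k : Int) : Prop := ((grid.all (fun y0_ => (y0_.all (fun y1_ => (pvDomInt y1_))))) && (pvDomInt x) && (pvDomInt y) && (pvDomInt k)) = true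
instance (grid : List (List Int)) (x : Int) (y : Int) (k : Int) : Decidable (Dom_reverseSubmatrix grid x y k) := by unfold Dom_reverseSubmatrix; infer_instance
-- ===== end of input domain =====

-- B replaces A's converging two-pointer in-place column-swap loop by a snapshot/reverse/writeback
-- two-pass decomposition (objective: simpler). Both Pythons mutate `grid` in place and return it;
-- the equivalence proved here is about the returned value (the in-place effect is the same rows).


-- ===== PORT A =====
-- grid[t][j] read / write with Nat indices; exact for the nonnegative in-range indices Pre_ admits
def pvCell (g : List (List Int)) (t j : Nat) : Int := (g.getD t []).getD j 0
def pvSetCell (g : List (List Int)) (t j : Nat) (v : Int) : List (List Int) :=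
  g.set t ((g.getD t []).set j v)

-- the inner `for i in range(y, y+k)` of A: tuple-swap grid[l][i], grid[r][i]
def pvSwapCols (g : List (List Int)) (l r y k : Int) : List (List Int) :=
  (PySem.List.pyRange y (y + k) 1).foldl
    (fun h i =>
      let a := pvCell h r.toNat i.toNat
      let b := pvCell h l.toNat i.toNat
      pvSetCell (pvSetCell h l.toNat i.toNat a) r.toNat i.toNat b) g

-- the `while l_row < r_row` loop of A
def pvWhileA (y k l r : Int) (g : List (List Int)) : List (List Int) :=
  if l < r then pvWhileA y k (l + 1) (r - 1) (pvSwapCols g l r y k) else g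
termination_by (r - l).toNat
decreasing_by omega

def reverseSubmatrix (grid : List (List Int)) (x : Int) (y : Int) (k : Int) : List (List Int) :=
  pvWhileA y k x (x + k - 1) grid

-- ===== PORT B =====
-- Python slice assignment row[y:y+k] = seg; exact for the 0 ≤ y, y+k ≤ len row that Pre_ admits
def pvSplice (row : List Int) (y k : Int) (seg : List Int) : List Int :=
  row.take y.toNat ++ seg ++ row.drop (y + k).toNat

def reverseSubmatrix_alt (grid : List (List Int)) (x : Int) (y : Int) (k : Int) : List (List Int) :=
  if k ≤ 1 then grid
  else
    let idxs := PySem.List.pyRange x (x + k) 1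
    let rows := idxs.map (fun r => PySem.List.slice (grid.getD r.toNat []) (some y) (some (y + k)))
    let rows := rows.reverse
    (PySem.List.enumerate idxs).foldl
      (fun h p => h.set p.2.toNat (pvSplice (h.getD p.2.toNat []) y k (rows.getD p.1.toNat []))) grid

-- ===== PRECONDITION & SPEC =====
-- Pre_ restricts to the task's natural domain (a valid k×k submatrix): for k ≥ 2 it requires
-- 0 ≤ x, 0 ≤ y and the touched rows/columns in bounds; outside it A either raises IndexError or
-- relies on Python's negative-index wraparound, an accident B's slice-based reads need not share.
def Pre_reverseSubmatrix (grid : List (List Int)) (x : Int) (y : Int) (k : Int) : Prop :=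
  k ≤ 1 ∨ (0 ≤ x ∧ 0 ≤ y ∧ x + k ≤ (grid.length : Int) ∧
    ∀ t ∈ List.range grid.length, x ≤ (t : Int) → (t : Int) < x + k →
      y + k ≤ ((grid.getD t []).length : Int))
instance (grid : List (List Int)) (x : Int) (y : Int) (k : Int) : Decidable (Pre_reverseSubmatrix grid x y k) := by unfold Pre_reverseSubmatrix; infer_instance

def pvWitness_reverseSubmatrix : List (List Int) × Int × Int × Int := ([[1, 2], [3, 4]], 0, 0, 2)

def Spec_reverseSubmatrix (grid : List (List Int)) (x : Int) (y : Int) (k : Int) (out : List (List Int)) : Prop := out = reverseSubmatrix_alt grid x y k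
instance (grid : List (List Int)) (x : Int) (y : Int) (k : Int) (out : List (List Int)) : Decidable (Spec_reverseSubmatrix grid x y k out) := by unfold Spec_reverseSubmatrix; infer_instance

-- ===== CLAIM (what is proved, stated in full; the proofs are below) =====
def Claim_equal_reverseSubmatrix : Prop := ∀ (grid : List (List Int)) (x : Int) (y : Int) (k : Int), Dom_reverseSubmatrix grid x y k → Pre_reverseSubmatrix grid x y k → Spec_reverseSubmatrix grid x y k (reverseSubmatrix grid x y k)

-- ===== LEMMAS AND PROOFS =====

-- row t of g (missing rows read as [])
def pvRow (g : List (List Int)) (t : Nat) : List Int := g.getD t []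

lemma pvCell_eq (g : List (List Int)) (t j : Nat) : pvCell g t j = (pvRow g t).getD j 0 := rfl

lemma pvRow_set (g : List (List Int)) (n : Nat) (r : List Int) (t : Nat) :
    pvRow (g.set n r) t = if t = n ∧ n < g.length then r else pvRow g t := by
  simp [pvRow, List.getD_eq_getElem?_getD, List.getElem?_set]
  split_ifs <;> simp_all

lemma pvRow_setCell (g : List (List Int)) (n j : Nat) (v : Int) (t : Nat) :
    pvRow (pvSetCell g n j v) t = if t = n ∧ n < g.length then (pvRow g n).set j v else pvRow g t := by
  simpa [pvSetCell, pvRow] using pvRow_set g n ((pvRow g n).set j v) t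

lemma length_setCell (g : List (List Int)) (n j : Nat) (v : Int) :
    (pvSetCell g n j v).length = g.length := by simp [pvSetCell]

lemma rowLen_setCell (g : List (List Int)) (n j : Nat) (v : Int) (t : Nat) :
    (pvRow (pvSetCell g n j v) t).length = (pvRow g t).length := by
  rw [pvRow_setCell]; split_ifs with h
  · rw [h.1]; simp
  · rfl

lemma cell_setCell (g : List (List Int)) (n j : Nat) (v : Int) (hn : n < g.length)
    (hj : j < (pvRow g n).length) (t j' : Nat) :
    pvCell (pvSetCell g n j v) t j' = if t = n ∧ j' = j then v else pvCell g t j' := by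
  rw [pvCell_eq, pvRow_setCell]
  by_cases ht : t = n
  · rw [if_pos ⟨ht, hn⟩]
    by_cases hj' : j' = j
    · rw [if_pos ⟨ht, hj'⟩, hj']
      simp [List.getD_eq_getElem?_getD, hj]
    · rw [if_neg (by tauto), pvCell_eq, ht]
      rw [List.getD_eq_getElem?_getD, List.getD_eq_getElem?_getD,
        List.getElem?_set_ne (by omega : j ≠ j')]
  · rw [if_neg (by tauto), if_neg (by tauto), pvCell_eq]

-- characterisation of A's inner column-swap loop (Nat coordinates, in bounds)
lemma swapAux (L R Y : Nat) (hne : L ≠ R) :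
    ∀ (K : Nat) (g : List (List Int)), L < g.length → R < g.length →
      Y + K ≤ (pvRow g L).length → Y + K ≤ (pvRow g R).length →
      (pvSwapCols g (L:Int) (R:Int) (Y:Int) (K:Int)).length = g.length ∧
      (∀ t, (pvRow (pvSwapCols g (L:Int) (R:Int) (Y:Int) (K:Int)) t).length = (pvRow g t).length) ∧
      (∀ t j, pvCell (pvSwapCols g (L:Int) (R:Int) (Y:Int) (K:Int)) t j =
        if t = L ∧ Y ≤ j ∧ j < Y + K then pvCell g R j
        else if t = R ∧ Y ≤ j ∧ j < Y + K then pvCell g L j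
        else pvCell g t j) := by
  intro K
  induction K with
  | zero =>
    intro g hL hR _ _
    simp only [pvSwapCols]
    rw [show (Y:Int) + ((0:Nat):Int) = (Y:Int) by push_cast; ring,
      PySem.List.pyRange_one_eq_nil (by omega)]
    refine ⟨rfl, fun t => rfl, fun t j => ?_⟩
    rw [if_neg (by omega), if_neg (by omega)]
    rfl
  | succ K ih =>
    intro g hL hR hrL hrR
    have hunf : pvSwapCols g (L:Int) (R:Int) (Y:Int) ((K+1:Nat):Int) =
        (fun h i =>
          let a := pvCell h (R:Int).toNat i.toNat
          let b := pvCell h (L:Int).toNat i.toNat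
          pvSetCell (pvSetCell h (L:Int).toNat i.toNat a) (R:Int).toNat i.toNat b)
        (pvSwapCols g (L:Int) (R:Int) (Y:Int) (K:Int)) ((Y:Int)+(K:Int)) := by
      simp only [pvSwapCols]
      rw [show (Y:Int) + ((K+1:Nat):Int) = ((Y:Int)+(K:Int)) + 1 by push_cast; ring,
        PySem.List.pyRange_one_succ_right (by omega), List.foldl_append]
      rfl
    obtain ⟨ihlen, ihrow, ihcell⟩ := ih g hL hR (by omega) (by omega)
    rw [hunf]
    simp only []
    set G := pvSwapCols g (L:Int) (R:Int) (Y:Int) (K:Int) with hG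
    have hGL : L < G.length := by omega
    have hGR : R < G.length := by omega
    have hGrL : Y + K < (pvRow G L).length := by rw [ihrow]; omega
    have hGrR : Y + K < (pvRow G R).length := by rw [ihrow]; omega
    have htn : ((Y:Int)+(K:Int)).toNat = Y + K := by omega
    have hLtn : ((L:Int)).toNat = L := by omega
    have hRtn : ((R:Int)).toNat = R := by omega
    rw [htn, hLtn, hRtn]
    set a := pvCell G R (Y+K) with ha
    set b := pvCell G L (Y+K) with hb
    have haval : a = pvCell g R (Y+K) := by
      rw [ha, ihcell]; rw [if_neg (by omega), if_neg (by omega)]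
    have hbval : b = pvCell g L (Y+K) := by
      rw [hb, ihcell]; rw [if_neg (by omega), if_neg (by omega)]
    refine ⟨by rw [length_setCell, length_setCell, ihlen], fun t => ?_, fun t j => ?_⟩
    · rw [rowLen_setCell, rowLen_setCell, ihrow]
    · rw [cell_setCell _ _ _ _ (by rw [length_setCell]; omega) (by rw [rowLen_setCell]; omega),
        cell_setCell _ _ _ _ hGL (by omega)]
      by_cases hcol : Y ≤ j ∧ j < Y + K + 1
      · by_cases hjK : j = Y + K
        · subst hjK
          by_cases htR : t = R
          · rw [if_pos ⟨htR, rfl⟩, if_neg (by omega), if_pos (by exact ⟨htR, by omega, by omega⟩), hbval]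
          · rw [if_neg (by tauto)]
            by_cases htL : t = L
            · rw [if_pos ⟨htL, rfl⟩, if_pos ⟨htL, by omega, by omega⟩, haval]
            · rw [if_neg (by tauto), ihcell, if_neg (by tauto), if_neg (by tauto),
                if_neg (by tauto), if_neg (by tauto)]
        · have hj' : j < Y + K := by omega
          by_cases htL : t = L
          · rw [if_neg (by omega), if_neg (by omega), ihcell,
              if_pos ⟨htL, hcol.1, hj'⟩, if_pos ⟨htL, hcol.1, by omega⟩]
          · by_cases htR : t = R
            · rw [if_neg (by omega), if_neg (by omega), ihcell, if_neg (by tauto),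
                if_pos ⟨htR, hcol.1, hj'⟩, if_neg (by tauto), if_pos ⟨htR, hcol.1, by omega⟩]
            · rw [if_neg (by omega), if_neg (by omega), ihcell, if_neg (by tauto),
                if_neg (by tauto), if_neg (by tauto), if_neg (by tauto)]
      · rw [if_neg (by omega), if_neg (by omega), ihcell, if_neg (by omega), if_neg (by omega),
          if_neg (by omega), if_neg (by omega)]

-- characterisation of A's while loop: rows l..r reversed on columns Y..Y+K-1
lemma whileA_char (Y K : Nat) :
    ∀ (n : Nat) (g : List (List Int)) (l r : Int), (r - l).toNat ≤ n → 0 ≤ l →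
      r < (g.length : Int) →
      (∀ t : Nat, l ≤ (t:Int) → (t:Int) ≤ r → Y + K ≤ (pvRow g t).length) →
      (pvWhileA (Y:Int) (K:Int) l r g).length = g.length ∧
      (∀ t, (pvRow (pvWhileA (Y:Int) (K:Int) l r g) t).length = (pvRow g t).length) ∧
      (∀ t j, pvCell (pvWhileA (Y:Int) (K:Int) l r g) t j =
        if l ≤ (t:Int) ∧ (t:Int) ≤ r ∧ Y ≤ j ∧ j < Y + K then pvCell g (l + r - (t:Int)).toNat j
        else pvCell g t j) := by
  intro n
  induction n with
  | zero =>
    intro g l r hn hl hr hrows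
    rw [pvWhileA, if_neg (by omega)]
    refine ⟨rfl, fun t => rfl, fun t j => ?_⟩
    split_ifs with h
    · have e : (l + r - (t:Int)).toNat = t := by omega
      rw [e]
    · rfl
  | succ n ih =>
    intro g l r hn hl hr hrows
    by_cases hlr : l < r
    · rw [pvWhileA, if_pos hlr]
      have hlN : ((l.toNat : Nat) : Int) = l := by omega
      have hrN : ((r.toNat : Nat) : Int) = r := by omega
      have hsw : pvSwapCols g l r (Y:Int) (K:Int)
          = pvSwapCols g ((l.toNat : Nat) : Int) ((r.toNat : Nat) : Int) (Y:Int) (K:Int) := by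
        rw [hlN, hrN]
      obtain ⟨slen, srow, scell⟩ := swapAux l.toNat r.toNat Y (by omega) K g
        (by omega) (by omega)
        (by have := hrows l.toNat (by omega) (by omega); omega)
        (by have := hrows r.toNat (by omega) (by omega); omega)
      rw [← hsw] at slen srow scell
      set G := pvSwapCols g l r (Y:Int) (K:Int) with hG
      obtain ⟨wlen, wrow, wcell⟩ := ih G (l+1) (r-1) (by omega) (by omega) (by omega)
        (by intro t h1 h2; rw [srow]; exact hrows t (by omega) (by omega))
      refine ⟨by rw [wlen, slen], fun t => by rw [wrow, srow], fun t j => ?_⟩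
      rw [wcell]
      by_cases hcol : Y ≤ j ∧ j < Y + K
      · by_cases hin : l + 1 ≤ (t:Int) ∧ (t:Int) ≤ r - 1
        · rw [if_pos ⟨hin.1, hin.2, hcol.1, hcol.2⟩, scell]
          have e : l + 1 + (r - 1) - (t:Int) = l + r - (t:Int) := by ring
          rw [e, if_neg (by omega), if_neg (by omega), if_pos (by omega)]
        · rw [if_neg (by tauto), scell]
          by_cases htl : (t:Int) = l
          · rw [if_pos ⟨by omega, hcol.1, hcol.2⟩, if_pos (by omega)]
            have e : (l + r - (t:Int)).toNat = r.toNat := by omega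
            rw [e]
          · by_cases htr : (t:Int) = r
            · rw [if_neg (by omega), if_pos ⟨by omega, hcol.1, hcol.2⟩, if_pos (by omega)]
              have e : (l + r - (t:Int)).toNat = l.toNat := by omega
              rw [e]
            · rw [if_neg (by omega), if_neg (by omega), if_neg (by omega)]
      · rw [if_neg (by omega), scell, if_neg (by omega), if_neg (by omega), if_neg (by omega)]
    · rw [pvWhileA, if_neg hlr]
      refine ⟨rfl, fun t => rfl, fun t j => ?_⟩
      split_ifs with h
      · have e : (l + r - (t:Int)).toNat = t := by omega
        rw [e]
      · rfl

-- cells and length of Python's slice assignment row[Y:Y+K] = seg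
lemma splice_cell (row seg : List Int) (Y K : Nat) (h : Y + K ≤ row.length)
    (hs : seg.length = K) (j : Nat) :
    (pvSplice row (Y:Int) (K:Int) seg).getD j 0
      = if Y ≤ j ∧ j < Y + K then seg.getD (j - Y) 0 else row.getD j 0 := by
  have e1 : ((Y:Int)).toNat = Y := by omega
  have e2 : ((Y:Int)+(K:Int)).toNat = Y + K := by omega
  rw [pvSplice, e1, e2, List.append_assoc]
  have hY : (row.take Y).length = Y := by simp; omega
  by_cases h1 : j < Y
  · rw [if_neg (by omega), List.getD_eq_getElem?_getD, List.getElem?_append_left (by omega)]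
    simp [h1, List.getD_eq_getElem?_getD]
  · rw [List.getD_eq_getElem?_getD, List.getElem?_append_right (by omega), hY]
    by_cases h2 : j < Y + K
    · rw [if_pos (by omega), List.getElem?_append_left (by omega)]
      simp [List.getD_eq_getElem?_getD]
    · rw [if_neg (by omega), List.getElem?_append_right (by omega), hs]
      rw [List.getD_eq_getElem?_getD, List.getElem?_drop]
      have e : Y + K + (j - Y - K) = j := by omega
      rw [e]

lemma splice_length (row seg : List Int) (Y K : Nat) (h : Y + K ≤ row.length)
    (hs : seg.length = K) :
    (pvSplice row (Y:Int) (K:Int) seg).length = row.length := by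
  have e2 : ((Y:Int)+(K:Int)).toNat = Y + K := by omega
  rw [pvSplice, e2]; simp; omega

-- characterisation of B's writeback loop (row level)
lemma writeAux (Y K : Nat) (rows : List (List Int)) :
    ∀ (m : Nat) (g : List (List Int)) (a : Int) (s : Nat), 0 ≤ a →
      a + (m:Int) ≤ (g.length : Int) →
      ((PySem.List.enumerate (PySem.List.pyRange a (a + (m:Int)) 1) ((s:Nat):Int)).foldl
        (fun h p => h.set p.2.toNat (pvSplice (h.getD p.2.toNat []) (Y:Int) (K:Int)
          (rows.getD p.1.toNat []))) g).length = g.length ∧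
      ∀ t : Nat, pvRow ((PySem.List.enumerate (PySem.List.pyRange a (a + (m:Int)) 1) ((s:Nat):Int)).foldl
        (fun h p => h.set p.2.toNat (pvSplice (h.getD p.2.toNat []) (Y:Int) (K:Int)
          (rows.getD p.1.toNat []))) g) t =
        if a ≤ (t:Int) ∧ (t:Int) < a + (m:Int) then
          pvSplice (pvRow g t) (Y:Int) (K:Int) (rows.getD (s + ((t:Int) - a).toNat) [])
        else pvRow g t := by
  intro m
  induction m with
  | zero =>
    intro g a s ha hm
    rw [show a + ((0:Nat):Int) = a by push_cast; ring, PySem.List.pyRange_one_eq_nil (by omega),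
      PySem.List.enumerate_nil]
    exact ⟨rfl, fun t => by rw [if_neg (by omega)]; rfl⟩
  | succ m ih =>
    intro g a s ha hm
    have hm' : a + ((m+1:Nat):Int) = (a+1) + (m:Int) := by push_cast; ring
    rw [hm', PySem.List.pyRange_one_cons (by omega), PySem.List.enumerate_cons, List.foldl_cons]
    have hsN : (((s:Nat):Int)).toNat = s := by omega
    have haN : a.toNat < g.length := by omega
    rw [hsN]
    have hcast : ((s:Nat):Int) + 1 = ((s+1 : Nat) : Int) := by push_cast; ring
    rw [hcast]
    set g1 := g.set a.toNat (pvSplice (g.getD a.toNat []) ((Y:Nat):Int) ((K:Nat):Int)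
      (rows.getD s [])) with hg1
    have hg1len : g1.length = g.length := by rw [hg1]; simp
    have hrow1 : ∀ t : Nat, pvRow g1 t =
        if t = a.toNat then pvSplice (pvRow g a.toNat) (Y:Int) (K:Int) (rows.getD s [])
        else pvRow g t := by
      intro t
      rw [hg1]
      rw [pvRow_set]
      by_cases ht : t = a.toNat
      · rw [if_pos ⟨ht, haN⟩, if_pos ht]; rfl
      · rw [if_neg (by tauto), if_neg ht]
    obtain ⟨ilen, irow⟩ := ih g1 (a+1) (s+1) (by omega) (by omega)
    refine ⟨by rw [ilen, hg1len], fun t => ?_⟩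
    rw [irow]
    by_cases h1 : a + 1 ≤ (t:Int) ∧ (t:Int) < (a+1) + (m:Int)
    · rw [if_pos h1, hrow1, if_neg (by omega), if_pos (by omega)]
      have e : s + 1 + ((t:Int) - (a+1)).toNat = s + ((t:Int) - a).toNat := by omega
      rw [e]
    · rw [if_neg (by tauto), hrow1]
      by_cases ht : t = a.toNat
      · rw [if_pos ht, if_pos (by omega)]
        have e : s + (((t:Int)) - a).toNat = s := by omega
        rw [e, ht]
      · rw [if_neg ht, if_neg (by omega)]

-- lists with equal shape and equal cells are equal
lemma grid_ext (g h : List (List Int)) (h1 : g.length = h.length)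
    (h2 : ∀ t, (pvRow g t).length = (pvRow h t).length)
    (h3 : ∀ t j, pvCell g t j = pvCell h t j) : g = h := by
  have hrow : ∀ (t : Nat) (ht : t < g.length), pvRow g t = g[t] := by
    intro t ht; simp [pvRow, List.getD_eq_getElem?_getD, List.getElem?_eq_getElem ht]
  have hrow' : ∀ (t : Nat) (ht : t < h.length), pvRow h t = h[t] := by
    intro t ht; simp [pvRow, List.getD_eq_getElem?_getD, List.getElem?_eq_getElem ht]
  apply List.ext_getElem h1
  intro t ht ht'
  rw [← hrow t ht, ← hrow' t ht']
  apply List.ext_getElem (by rw [h2])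
  intro j hj hj'
  have := h3 t j
  rw [pvCell_eq, pvCell_eq, List.getD_eq_getElem?_getD, List.getD_eq_getElem?_getD,
    List.getElem?_eq_getElem hj, List.getElem?_eq_getElem hj'] at this
  simpa using this

-- characterisation of B for k ≥ 2 (same statement shape as whileA_char at l = X, r = X+K-1)
lemma seg_getD (src : List Int) (Y K : Nat) (j : Nat)
    (h1 : Y ≤ j) (h2 : j < Y + K) :
    ((src.drop Y).take K).getD (j - Y) 0 = src.getD j 0 := by
  rw [List.getD_eq_getElem?_getD, List.getElem?_take, if_pos (by omega), List.getElem?_drop]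
  have e : Y + (j - Y) = j := by omega
  rw [e, List.getD_eq_getElem?_getD]

lemma alt_char (grid : List (List Int)) (X Y K : Nat) (h2 : 2 ≤ K)
    (hxk : (X:Int) + (K:Int) ≤ (grid.length : Int))
    (hrows : ∀ t : Nat, X ≤ t → t < X + K → Y + K ≤ (pvRow grid t).length) :
    (reverseSubmatrix_alt grid (X:Int) (Y:Int) (K:Int)).length = grid.length ∧
    (∀ t, (pvRow (reverseSubmatrix_alt grid (X:Int) (Y:Int) (K:Int)) t).length = (pvRow grid t).length) ∧
    (∀ t j, pvCell (reverseSubmatrix_alt grid (X:Int) (Y:Int) (K:Int)) t j =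
      if (X:Int) ≤ (t:Int) ∧ (t:Int) ≤ (X:Int) + (K:Int) - 1 ∧ Y ≤ j ∧ j < Y + K
      then pvCell grid ((X:Int) + ((X:Int) + (K:Int) - 1) - (t:Int)).toNat j
      else pvCell grid t j) := by
  have hk1 : ¬ ((K:Int) ≤ 1) := by omega
  set Rv := ((PySem.List.pyRange (X:Int) ((X:Int) + (K:Int)) 1).map
      (fun r => PySem.List.slice (grid.getD r.toNat []) (some (Y:Int))
        (some ((Y:Int) + (K:Int))))).reverse with hRv
  have heq : reverseSubmatrix_alt grid (X:Int) (Y:Int) (K:Int) =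
      (PySem.List.enumerate (PySem.List.pyRange (X:Int) ((X:Int) + (K:Int)) 1) 0).foldl
        (fun h p => h.set p.2.toNat (pvSplice (h.getD p.2.toNat []) (Y:Int) (K:Int)
          (Rv.getD p.1.toNat []))) grid := by
    simp only [reverseSubmatrix_alt]
    rw [if_neg hk1]
  have hRvlen : Rv.length = K := by
    rw [hRv]; simp [PySem.List.length_pyRange_one]
  have hseg : ∀ off : Nat, off < K →
      Rv.getD off [] = ((pvRow grid (X + (K - 1 - off))).drop Y).take K := by
    intro off hoff
    have hlt : off < ((PySem.List.pyRange (X:Int) ((X:Int) + (K:Int)) 1).map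
        (fun r => PySem.List.slice (grid.getD r.toNat []) (some (Y:Int))
          (some ((Y:Int) + (K:Int))))).length := by
      simp [PySem.List.length_pyRange_one]; omega
    rw [List.getD_eq_getElem?_getD, hRv, List.getElem?_reverse hlt]
    rw [List.getElem?_map]
    have hlen' : ((PySem.List.pyRange (X:Int) ((X:Int) + (K:Int)) 1).map
        (fun r => PySem.List.slice (grid.getD r.toNat []) (some (Y:Int))
          (some ((Y:Int) + (K:Int))))).length = K := by
      simp [PySem.List.length_pyRange_one]
    rw [hlen', PySem.List.getElem?_pyRange_one, if_pos (by omega)]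
    simp only [Option.map_some, Option.getD_some]
    have e1 : ((X:Int) + ((K - 1 - off : Nat) : Int)).toNat = X + (K - 1 - off) := by omega
    rw [e1, PySem.List.slice_natCast_add]
    rfl
  have hseglen : ∀ off : Nat, off < K → (Rv.getD off []).length = K := by
    intro off hoff
    rw [hseg off hoff]
    have := hrows (X + (K - 1 - off)) (by omega) (by omega)
    simp; omega
  obtain ⟨wlen, wrow⟩ := writeAux Y K Rv K grid (X:Int) 0 (by omega) (by omega)
  simp only [Nat.cast_zero] at wlen wrow
  have hrowF : ∀ t : Nat,
      pvRow (reverseSubmatrix_alt grid (X:Int) (Y:Int) (K:Int)) t =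
        if (X:Int) ≤ (t:Int) ∧ (t:Int) < (X:Int) + (K:Int) then
          pvSplice (pvRow grid t) (Y:Int) (K:Int) (Rv.getD (((t:Int) - (X:Int)).toNat) [])
        else pvRow grid t := by
    intro t
    rw [heq, wrow]
    split_ifs with h
    · have e : 0 + (((t:Int)) - (X:Int)).toNat = ((t:Int) - (X:Int)).toNat := by omega
      rw [e]
    · rfl
  have hsrclen : ∀ t : Nat, X ≤ t → t < X + K → Y + K ≤ (pvRow grid t).length := hrows
  refine ⟨by rw [heq, wlen], fun t => ?_, fun t j => ?_⟩
  · rw [hrowF]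
    split_ifs with h
    · have hoff : ((t:Int) - (X:Int)).toNat < K := by omega
      exact splice_length _ _ _ _ (hsrclen t (by omega) (by omega)) (hseglen _ hoff)
    · rfl
  · rw [pvCell_eq, hrowF]
    by_cases h : (X:Int) ≤ (t:Int) ∧ (t:Int) < (X:Int) + (K:Int)
    · rw [if_pos h]
      have hoff : ((t:Int) - (X:Int)).toNat < K := by omega
      rw [splice_cell _ _ _ _ (hsrclen t (by omega) (by omega)) (hseglen _ hoff)]
      by_cases hcol : Y ≤ j ∧ j < Y + K
      · rw [if_pos hcol, if_pos ⟨h.1, by omega, hcol.1, hcol.2⟩]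
        rw [hseg _ hoff]
        have hsrc : X + (K - 1 - ((t:Int) - (X:Int)).toNat)
            = ((X:Int) + ((X:Int) + (K:Int) - 1) - (t:Int)).toNat := by omega
        rw [seg_getD _ _ _ j hcol.1 hcol.2, hsrc]
        rfl
      · rw [if_neg hcol, if_neg (by tauto)]
        rfl
    · rw [if_neg h, if_neg (by omega)]
      rfl

-- ===== VERDICT (by name: the statement is the Claim_ definition above) =====
theorem reverseSubmatrix_spec : Claim_equal_reverseSubmatrix := by
  intro grid x y k hdom hpre
  unfold Spec_reverseSubmatrix
  by_cases hk : k ≤ 1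
  · unfold reverseSubmatrix reverseSubmatrix_alt
    rw [if_pos hk, pvWhileA, if_neg (by omega)]
  · rcases hpre with h1 | ⟨hx, hy, hxk, hrows⟩
    · omega
    have hxX : x = ((x.toNat : Nat) : Int) := by omega
    have hyY : y = ((y.toNat : Nat) : Int) := by omega
    have hkK : k = ((k.toNat : Nat) : Int) := by omega
    set X := x.toNat
    set Y := y.toNat
    set K := k.toNat
    have hrows' : ∀ t : Nat, X ≤ t → t < X + K → Y + K ≤ (pvRow grid t).length := by
      intro t ht1 ht2
      have htlen : t < grid.length := by omega
      have := hrows t (List.mem_range.mpr htlen) (by omega) (by omega)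
      show Y + K ≤ (grid.getD t []).length
      omega
    have hA : reverseSubmatrix grid x y k
        = pvWhileA (Y:Int) (K:Int) (X:Int) ((X:Int) + (K:Int) - 1) grid := by
      unfold reverseSubmatrix
      rw [hxX, hyY, hkK]
    have hB : reverseSubmatrix_alt grid x y k
        = reverseSubmatrix_alt grid (X:Int) (Y:Int) (K:Int) := by
      rw [hxX, hyY, hkK]
    rw [hA, hB]
    obtain ⟨alen, arow, acell⟩ := whileA_char Y K ((((X:Int) + (K:Int) - 1) - (X:Int)).toNat)
      grid (X:Int) ((X:Int) + (K:Int) - 1) (le_refl _) (by omega) (by omega)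
      (fun t ht1 ht2 => hrows' t (by omega) (by omega))
    obtain ⟨blen, brow, bcell⟩ := alt_char grid X Y K (by omega) (by omega) hrows'
    exact grid_ext _ _ (by rw [alen, blen]) (fun t => by rw [arow, brow])
      (fun t j => by rw [acell, bcell])
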